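-- pv_equiv track=rewrite | github.com/imawscertified/IbQues | array-maxsprod.py | grt
-- ===== SOURCE A (Python) =====
-- def grt(A, prev=True):
--     stack, ans = list(), [0] * len(A)
--
--     if prev:
--         it = range(len(A))
--     else:
--         it = range(len(A)-1, -1, -1)
--
--     for i in it:
--         while stack and A[i] >= A[stack[-1]]:
--             stack.pop()
--         ans[i] = stack[-1] if stack else 0
--         stack.append(i)
--     return ans
-- ===== SOURCE B (Python) =====
-- def grt(A, prev=True):
--     # Direct O(n^2) scan: for each i take the nearest strictly-greater neighbor's
--     # index (previous side if prev, next side otherwise), 0 when there is none.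
--     n = len(A)
--     ans = []
--     for i in range(n):
--         js = range(i - 1, -1, -1) if prev else range(i + 1, n)
--         ans.append(next((j for j in js if A[j] > A[i]), 0))
--     return ans
-- ===== Notes on version B (the rewrite author's own statement) =====
-- stated objective: simpler
-- what changed: Replaces the single-pass monotonic stack with a plain per-index scan for the nearest strictly-greater neighbor (no stack, no in-place ans array).
import Mathlib
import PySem

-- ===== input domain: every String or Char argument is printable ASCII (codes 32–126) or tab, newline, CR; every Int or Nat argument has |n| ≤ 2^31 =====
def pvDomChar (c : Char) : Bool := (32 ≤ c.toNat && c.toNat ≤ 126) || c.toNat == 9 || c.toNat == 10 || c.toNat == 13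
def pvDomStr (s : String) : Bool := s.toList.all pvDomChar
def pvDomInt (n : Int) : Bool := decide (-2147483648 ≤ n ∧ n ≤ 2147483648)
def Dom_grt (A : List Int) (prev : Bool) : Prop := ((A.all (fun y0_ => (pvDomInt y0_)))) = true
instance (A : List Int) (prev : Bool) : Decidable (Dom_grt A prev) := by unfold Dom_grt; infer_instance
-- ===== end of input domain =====

-- B replaces the single-pass monotonic stack with a plain per-index scan for the
-- nearest strictly-greater neighbor's index (objective: simpler; B is O(n^2) vs A's O(n)).

-- ===== PORT A =====
-- The stack is kept top-first (Python appends/pops at the END; head here = stack[-1]).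
-- 'while stack and A[i] >= A[stack[-1]]: stack.pop()'  — all indices come from range()
-- and are in bounds, so A[...] is ported with pyGetD (exact here):
def grtPop (A : List Int) (ai : Int) : List Int → List Int
  | [] => []
  | t :: rest =>
    if ai ≥ PySem.List.pyGetD A t 0 then grtPop A ai rest else t :: rest

-- the loop body: pop, write 'ans[i] = stack[-1] if stack else 0', push i
def grtStep (A : List Int) (st : List Int × List Int) (i : Int) : List Int × List Int :=
  let stack := grtPop A (PySem.List.pyGetD A i 0) st.1
  let ans := PySem.List.pySetD st.2 i (match stack with | [] => 0 | t :: _ => t)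
  (i :: stack, ans)

def grt (A : List Int) (prev : Bool) : List Int :=
  let n : Int := A.length
  let it : List Int := if prev then PySem.List.pyRange 0 n 1 else PySem.List.pyRange (n - 1) (-1) (-1)
  (it.foldl (grtStep A) ([], List.replicate A.length 0)).2

-- ===== PORT B =====
def grt_alt (A : List Int) (prev : Bool) : List Int :=
  let n : Int := A.length
  (PySem.List.pyRange 0 n 1).map (fun i =>
    let js := if prev then PySem.List.pyRange (i - 1) (-1) (-1) else PySem.List.pyRange (i + 1) n 1
    ((js.find? (fun j => PySem.List.pyGetD A j 0 > PySem.List.pyGetD A i 0)).getD 0))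

-- ===== PRECONDITION & SPEC =====
def Spec_grt (A : List Int) (prev : Bool) (out : List Int) : Prop := out = grt_alt A prev
instance (A : List Int) (prev : Bool) (out : List Int) : Decidable (Spec_grt A prev out) := by unfold Spec_grt; infer_instance

-- ===== CLAIM (what is proved, stated in full; the proofs are below) =====
def Claim_equal_grt : Prop := ∀ (A : List Int) (prev : Bool), Dom_grt A prev → Spec_grt A prev (grt A prev)

-- ===== LEMMAS AND PROOFS =====

-- value at a Nat index (indices used are always in range, so the default never shows)
def gv (A : List Int) (j : ℕ) : Int := A.getD j 0

-- j (with j < m) is still on the stack after the prev=True loop processed 0..m-1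
def domT (A : List Int) (m j : ℕ) : Bool := decide (∀ k < m, j < k → gv A k < gv A j)
-- the prev=True stack after processing 0..m-1, top-first (so: decreasing indices)
def stkT (A : List Int) (m : ℕ) : List ℕ := ((List.range m).filter (domT A m)).reverse
-- what B writes at index i when prev=True
def outT (A : List Int) (i : ℕ) : Int :=
  ((PySem.List.pyRange ((i : Int) - 1) (-1) (-1)).find?
    (fun j => PySem.List.pyGetD A j 0 > PySem.List.pyGetD A (i : Int) 0)).getD 0

-- j (with m ≤ j < n) is still on the stack after the prev=False loop processed n-1..m
def domF (A : List Int) (m j : ℕ) : Bool := decide (∀ k < j, m ≤ k → gv A k < gv A j)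
-- the prev=False stack after processing n-1..m, top-first (so: increasing indices)
def stkF (A : List Int) (m : ℕ) : List ℕ := (List.range' m (A.length - m)).filter (domF A m)
-- what B writes at index i when prev=False
def outF (A : List Int) (i : ℕ) : Int :=
  ((PySem.List.pyRange ((i : Int) + 1) (A.length : Int) 1).find?
    (fun j => PySem.List.pyGetD A j 0 > PySem.List.pyGetD A (i : Int) 0)).getD 0

theorem find?_eq_some_rev_range {p : ℕ → Bool} {m x : ℕ}
    (h : (List.range m).reverse.find? p = some x) :
    p x = true ∧ x < m ∧ ∀ k, x < k → k < m → p k = false := by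
  induction m with
  | zero => simp at h
  | succ m ih =>
    rw [List.range_succ, List.reverse_append] at h
    simp only [List.reverse_singleton, List.singleton_append, List.find?_cons] at h
    by_cases hm : p m = true
    · rw [hm] at h
      simp at h
      subst h
      exact ⟨hm, Nat.lt_succ_self m, fun k h1 h2 => absurd h2 (by omega)⟩
    · rw [Bool.not_eq_true] at hm
      rw [hm] at h
      obtain ⟨hx, hxm, hall⟩ := ih h
      refine ⟨hx, by omega, fun k h1 h2 => ?_⟩
      rcases Nat.lt_succ_iff_lt_or_eq.mp h2 with h2' | rfl
      · exact hall k h1 h2'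
      · exact hm

theorem find?_eq_some_range' {p : ℕ → Bool} {s c x : ℕ}
    (h : (List.range' s c).find? p = some x) :
    p x = true ∧ s ≤ x ∧ x < s + c ∧ ∀ k, s ≤ k → k < x → p k = false := by
  induction c generalizing s with
  | zero => simp at h
  | succ c ih =>
    rw [List.range'_succ, List.find?_cons] at h
    by_cases hs : p s = true
    · rw [hs] at h
      simp at h
      subst h
      exact ⟨hs, le_refl s, by omega, fun k h1 h2 => absurd h2 (by omega)⟩
    · rw [Bool.not_eq_true] at hs
      rw [hs] at h
      obtain ⟨hx, hsx, hxc, hall⟩ := ih h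
      refine ⟨hx, by omega, by omega, fun k h1 h2 => ?_⟩
      rcases Nat.lt_or_ge k (s+1) with h3 | h3
      · have : k = s := by omega
        subst this; exact hs
      · exact hall k h3 h2

-- if the first element satisfying p also satisfies q, the extra conjunct does not change the head
theorem head?_filter_and {α : Type} (p q : α → Bool) (l : List α)
    (h : ∀ x, l.find? p = some x → q x = true) :
    (l.filter (fun a => p a && q a)).head? = (l.filter p).head? := by
  induction l with
  | nil => simp
  | cons x t ih =>
    by_cases hx : p x = true
    · have hq : q x = true := h x (by simp [List.find?_cons_of_pos, hx])
      simp [hx, hq]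
    · rw [Bool.not_eq_true] at hx
      have ht : ∀ y, t.find? p = some y → q y = true := fun y hy =>
        h y (by rw [List.find?_cons_of_neg (by simp [hx])]; exact hy)
      simp [hx, ih ht]

theorem stkT_pairwise (A : List Int) (m : ℕ) :
    (stkT A m).Pairwise (fun a b => gv A a < gv A b) := by
  unfold stkT
  rw [List.pairwise_reverse, List.pairwise_filter]
  rw [List.pairwise_iff_getElem]
  intro i j hi hj hij
  simp only [List.getElem_range] at *
  intro hdi _
  rw [domT, decide_eq_true_iff] at hdi
  exact hdi j (by simpa using hj) hij

theorem stkF_pairwise (A : List Int) (m : ℕ) :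
    (stkF A m).Pairwise (fun a b => gv A a < gv A b) := by
  unfold stkF
  rw [List.pairwise_filter, List.pairwise_iff_getElem]
  intro i j hi hj hij
  simp only [List.getElem_range', Nat.one_mul] at *
  intro _ hdj
  rw [domF, decide_eq_true_iff] at hdj
  exact hdj (m + i) (by omega) (by omega)

theorem grtPop_eq_filter (A : List Int) (v : Int) (l : List ℕ)
    (h : l.Pairwise (fun a b => gv A a < gv A b)) :
    grtPop A v (l.map (Nat.cast : ℕ → Int)) = (l.filter (fun j => v < gv A j)).map Nat.cast := by
  induction l with
  | nil => simp [grtPop]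
  | cons t rest ih =>
    rw [List.pairwise_cons] at h
    obtain ⟨h1, h2⟩ := h
    simp only [List.map_cons, grtPop, PySem.List.pyGetD_natCast]
    by_cases hv : v ≥ A.getD t 0
    · rw [if_pos hv, List.filter_cons, if_neg (by simp only [gv, decide_eq_true_iff]; omega)]
      exact ih h2
    · rw [if_neg hv, List.filter_cons, if_pos (by simp only [gv, decide_eq_true_iff]; omega)]
      rw [List.filter_eq_self.mpr (fun b hb => by
        have hb1 := h1 b hb
        simp only [decide_eq_true_iff]
        simp only [gv] at hb1 ⊢
        omega)]
      simp

theorem stkT_succ (A : List Int) (m : ℕ) :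
    stkT A (m + 1) = m :: (stkT A m).filter (fun j => gv A m < gv A j) := by
  unfold stkT
  rw [List.range_succ, List.filter_append, List.reverse_append]
  have hm : domT A (m + 1) m = true := by
    rw [domT, decide_eq_true_iff]; intro k h1 h2; omega
  have hcongr : ∀ j ∈ List.range m,
      domT A (m + 1) j = (domT A m j && decide (gv A m < gv A j)) := by
    intro j hj
    rw [List.mem_range] at hj
    simp only [domT, ← Bool.decide_and, decide_eq_decide]
    constructor
    · intro h
      exact ⟨fun k h1 h2 => h k (by omega) h2, h m (by omega) hj⟩
    · intro ⟨h, hmj⟩ k h1 h2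
      rcases Nat.lt_succ_iff_lt_or_eq.mp h1 with h1' | rfl
      · exact h k h1' h2
      · exact hmj
  rw [List.filter_congr hcongr]
  have : (List.range m).filter (fun j => domT A m j && decide (gv A m < gv A j))
      = ((List.range m).filter (domT A m)).filter (fun j => decide (gv A m < gv A j)) := by
    rw [List.filter_filter]
    exact List.filter_congr (fun j _ => by rw [Bool.and_comm])
  rw [this, ← List.filter_reverse]
  simp [hm]

theorem stkF_succ (A : List Int) (m : ℕ) (hm : m < A.length) :
    stkF A m = m :: (stkF A (m + 1)).filter (fun j => gv A m < gv A j) := by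
  unfold stkF
  have hlen : A.length - m = (A.length - (m + 1)) + 1 := by omega
  rw [hlen, List.range'_succ, List.filter_cons]
  have hm0 : domF A m m = true := by
    rw [domF, decide_eq_true_iff]; intro k h1 h2; omega
  rw [if_pos hm0]
  congr 1
  have hcongr : ∀ j ∈ List.range' (m + 1) (A.length - (m + 1)),
      domF A m j = (domF A (m + 1) j && decide (gv A m < gv A j)) := by
    intro j hj
    rw [List.mem_range'] at hj
    obtain ⟨i, hi, rfl⟩ := hj
    simp only [domF, ← Bool.decide_and, decide_eq_decide]
    constructor
    · intro h
      exact ⟨fun k h1 h2 => h k h1 (by omega), h m (by omega) (le_refl m)⟩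
    · intro ⟨h, hmj⟩ k h1 h2
      rcases Nat.lt_or_ge k (m + 1) with h3 | h3
      · have : k = m := by omega
        subst this; exact hmj
      · exact h k h1 h3
  rw [List.filter_congr hcongr, List.filter_filter]
  exact List.filter_congr (fun j _ => by rw [Bool.and_comm])

-- the stack top after popping = B's scan result (prev=True)
theorem stkT_top (A : List Int) (m : ℕ) :
    ((stkT A m).filter (fun j => decide (gv A m < gv A j))).head?
      = (List.range m).reverse.find? (fun j => decide (gv A m < gv A j)) := by
  unfold stkT
  rw [← List.filter_reverse, List.filter_filter]
  have h1 : ((List.range m).reverse.filter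
      (fun a => decide (gv A m < gv A a) && domT A m a)).head?
      = ((List.range m).reverse.filter (fun j => decide (gv A m < gv A j))).head? := by
    apply head?_filter_and
    intro x hx
    obtain ⟨hpx, hxm, hall⟩ := find?_eq_some_rev_range hx
    rw [domT, decide_eq_true_iff]
    intro k h1 h2
    have hk := hall k h2 h1
    simp only [decide_eq_false_iff_not, not_lt] at hk
    simp only [decide_eq_true_iff] at hpx
    omega
  rw [h1, List.head?_filter]

-- the stack top after popping = B's scan result (prev=False)
theorem stkF_top (A : List Int) (m : ℕ) :
    ((stkF A (m + 1)).filter (fun j => decide (gv A m < gv A j))).head?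
      = (List.range' (m + 1) (A.length - (m + 1))).find? (fun j => decide (gv A m < gv A j)) := by
  unfold stkF
  rw [List.filter_filter]
  have h1 : ((List.range' (m + 1) (A.length - (m + 1))).filter
      (fun a => decide (gv A m < gv A a) && domF A (m + 1) a)).head?
      = ((List.range' (m + 1) (A.length - (m + 1))).filter
          (fun j => decide (gv A m < gv A j))).head? := by
    apply head?_filter_and
    intro x hx
    obtain ⟨hpx, hsx, hxc, hall⟩ := find?_eq_some_range' hx
    rw [domF, decide_eq_true_iff]
    intro k h1 h2
    have hk := hall k h2 h1
    simp only [decide_eq_false_iff_not, not_lt] at hk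
    simp only [decide_eq_true_iff] at hpx
    omega
  rw [h1, List.head?_filter]

-- B's Int-level scan, Nat-level (prev=True)
theorem outT_eq (A : List Int) (i : ℕ) :
    outT A i = (((List.range i).reverse.find?
      (fun j => decide (gv A i < gv A j))).map (Nat.cast : ℕ → Int)).getD 0 := by
  unfold outT
  have h : PySem.List.pyRange ((i : Int) - 1) (-1) (-1)
      = ((List.range i).reverse).map (Nat.cast : ℕ → Int) := by
    rw [PySem.List.pyRange_neg_one_eq_reverse]
    have h0 : (-1 : Int) + 1 = 0 := by ring
    have h1 : (i : Int) - 1 + 1 = (i : Int) := by ring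
    rw [h0, h1, PySem.List.pyRange_zero_nat, List.map_reverse]
  have hp : ((fun j => decide (PySem.List.pyGetD A j 0 > PySem.List.pyGetD A (i : Int) 0))
        ∘ (Nat.cast : ℕ → Int)) = fun j : ℕ => decide (gv A i < gv A j) := by
    funext j
    simp only [Function.comp_apply, PySem.List.pyGetD_natCast, gv, gt_iff_lt]
    rfl
  rw [h, List.find?_map, hp]

-- B's Int-level scan, Nat-level (prev=False)
theorem outF_eq (A : List Int) (i : ℕ) (hi : i < A.length) :
    outF A i = (((List.range' (i + 1) (A.length - (i + 1))).find?
      (fun j => decide (gv A i < gv A j))).map (Nat.cast : ℕ → Int)).getD 0 := by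
  unfold outF
  have h : PySem.List.pyRange ((i : Int) + 1) (A.length : Int) 1
      = (List.range' (i + 1) (A.length - (i + 1))).map (Nat.cast : ℕ → Int) := by
    rw [PySem.List.pyRange_one, List.range'_eq_map_range, List.map_map]
    have hc : ((A.length : Int) - ((i : Int) + 1)).toNat = A.length - (i + 1) := by omega
    rw [hc]
    apply List.map_congr_left
    intro k _
    simp only [Function.comp_apply]
    push_cast
    ring
  have hp : ((fun j => decide (PySem.List.pyGetD A j 0 > PySem.List.pyGetD A (i : Int) 0))
        ∘ (Nat.cast : ℕ → Int)) = fun j : ℕ => decide (gv A i < gv A j) := by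
    funext j
    simp only [Function.comp_apply, PySem.List.pyGetD_natCast, gv, gt_iff_lt]
    rfl
  rw [h, List.find?_map, hp]

-- one loop step, prev=True, at i = m
theorem stepT (A : List Int) (m : ℕ) (hm : m < A.length) :
    grtStep A ((stkT A m).map Nat.cast,
        (List.range A.length).map (fun i => if i < m then outT A i else 0)) (m : Int)
      = ((stkT A (m + 1)).map Nat.cast,
        (List.range A.length).map (fun i => if i < m + 1 then outT A i else 0)) := by
  unfold grtStep
  simp only [PySem.List.pyGetD_natCast, PySem.List.pySetD_natCast]
  have hpop : grtPop A (A.getD m 0) ((stkT A m).map Nat.cast)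
      = ((stkT A m).filter (fun j => decide (gv A m < gv A j))).map Nat.cast := by
    rw [grtPop_eq_filter A _ _ (stkT_pairwise A m)]
    simp only [gv]
    rfl
  rw [hpop]
  have hval : (match ((stkT A m).filter (fun j => decide (gv A m < gv A j))).map
        (Nat.cast : ℕ → Int) with | [] => 0 | t :: _ => t) = outT A m := by
    rw [outT_eq, ← stkT_top]
    cases (stkT A m).filter (fun j => decide (gv A m < gv A j)) with
    | nil => simp
    | cons t rest => simp
  rw [hval, Prod.mk.injEq]
  refine ⟨?_, ?_⟩
  · rw [stkT_succ]; simp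
  · apply List.ext_getElem
    · simp
    · intro i hi1 hi2
      simp only [List.getElem_set, List.getElem_map, List.getElem_range]
      have hi : i < A.length := by simpa using hi2
      by_cases him : i = m
      · subst him
        simp
      · rw [if_neg (by omega)]
        by_cases hlt : i < m
        · rw [if_pos hlt, if_pos (by omega)]
        · rw [if_neg hlt, if_neg (by omega)]

-- one loop step, prev=False, at i = m
theorem stepF (A : List Int) (m : ℕ) (hm : m < A.length) :
    grtStep A ((stkF A (m + 1)).map Nat.cast,
        (List.range A.length).map (fun i => if m + 1 ≤ i then outF A i else 0)) (m : Int)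
      = ((stkF A m).map Nat.cast,
        (List.range A.length).map (fun i => if m ≤ i then outF A i else 0)) := by
  unfold grtStep
  simp only [PySem.List.pyGetD_natCast, PySem.List.pySetD_natCast]
  have hpop : grtPop A (A.getD m 0) ((stkF A (m + 1)).map Nat.cast)
      = ((stkF A (m + 1)).filter (fun j => decide (gv A m < gv A j))).map Nat.cast := by
    rw [grtPop_eq_filter A _ _ (stkF_pairwise A (m + 1))]
    simp only [gv]
    rfl
  rw [hpop]
  have hval : (match ((stkF A (m + 1)).filter (fun j => decide (gv A m < gv A j))).map
        (Nat.cast : ℕ → Int) with | [] => 0 | t :: _ => t) = outF A m := by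
    rw [outF_eq A m hm, ← stkF_top]
    cases (stkF A (m + 1)).filter (fun j => decide (gv A m < gv A j)) with
    | nil => simp
    | cons t rest => simp
  rw [hval, Prod.mk.injEq]
  refine ⟨?_, ?_⟩
  · rw [stkF_succ A m hm]; simp
  · apply List.ext_getElem
    · simp
    · intro i hi1 hi2
      simp only [List.getElem_set, List.getElem_map, List.getElem_range]
      have hi : i < A.length := by simpa using hi2
      by_cases him : i = m
      · subst him
        simp
      · rw [if_neg (by omega)]
        by_cases hle : m + 1 ≤ i
        · rw [if_pos hle, if_pos (by omega)]
        · rw [if_neg hle, if_neg (by omega)]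

-- loop invariant, prev=True: state after processing 0..m-1
theorem invT (A : List Int) (m : ℕ) (hm : m ≤ A.length) :
    (PySem.List.pyRange 0 (m : Int) 1).foldl (grtStep A) ([], List.replicate A.length 0)
      = ((stkT A m).map Nat.cast,
        (List.range A.length).map (fun i => if i < m then outT A i else 0)) := by
  induction m with
  | zero =>
    have h0 : ((0 : ℕ) : Int) = 0 := rfl
    rw [h0, PySem.List.pyRange_one_eq_nil (le_refl 0), List.foldl_nil, Prod.mk.injEq]
    refine ⟨by simp [stkT], ?_⟩
    apply List.ext_getElem
    · simp
    · intro i h1 h2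
      simp only [List.getElem_replicate, List.getElem_map, List.getElem_range]
      rw [if_neg (by omega)]
  | succ m ih =>
    have h1 : ((m + 1 : ℕ) : Int) = (m : Int) + 1 := by push_cast; ring
    rw [h1, PySem.List.pyRange_one_succ_right (by positivity), List.foldl_append]
    rw [ih (by omega)]
    simpa using stepT A m (by omega)

-- loop invariant, prev=False: state after processing n-1..(n-c)
theorem invF (A : List Int) (c : ℕ) (hc : c ≤ A.length) :
    ((PySem.List.pyRange ((A.length - c : ℕ) : Int) (A.length : Int) 1).reverse).foldl
        (grtStep A) ([], List.replicate A.length 0)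
      = ((stkF A (A.length - c)).map Nat.cast,
        (List.range A.length).map (fun i => if A.length - c ≤ i then outF A i else 0)) := by
  induction c with
  | zero =>
    rw [PySem.List.pyRange_one_eq_nil (by omega), List.reverse_nil, List.foldl_nil,
      Prod.mk.injEq]
    refine ⟨by unfold stkF; simp, ?_⟩
    apply List.ext_getElem
    · simp
    · intro i h1 h2
      simp only [List.getElem_replicate, List.getElem_map, List.getElem_range]
      rw [if_neg (by simp only [List.length_replicate] at h1; omega)]
  | succ c ih =>
    have hm : A.length - (c + 1) < A.length := by omega
    have hsplit : ((A.length - c : ℕ) : Int) = ((A.length - (c + 1) : ℕ) : Int) + 1 := by omega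
    rw [PySem.List.pyRange_one_cons (by omega), List.reverse_cons, List.foldl_append]
    rw [← hsplit, ih (by omega)]
    have h2 : A.length - c = (A.length - (c + 1)) + 1 := by omega
    rw [h2]
    simpa using stepF A (A.length - (c + 1)) hm

theorem grt_true (A : List Int) : grt A true = (List.range A.length).map (outT A) := by
  unfold grt
  simp only [if_true]
  rw [invT A A.length (le_refl _)]
  exact List.map_congr_left (fun i hi => if_pos (List.mem_range.mp hi))

theorem grt_false (A : List Int) : grt A false = (List.range A.length).map (outF A) := by
  unfold grt
  simp only [Bool.false_eq_true, if_false]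
  have h : PySem.List.pyRange ((A.length : Int) - 1) (-1) (-1)
      = (PySem.List.pyRange ((A.length - A.length : ℕ) : Int) (A.length : Int) 1).reverse := by
    rw [PySem.List.pyRange_neg_one_eq_reverse]
    have h1 : ((A.length - A.length : ℕ) : Int) = -1 + 1 := by omega
    have h2 : (A.length : Int) = (A.length : Int) - 1 + 1 := by ring
    rw [← h1, ← h2]
  rw [h, invF A A.length (le_refl _)]
  exact List.map_congr_left (fun i hi => if_pos (by omega))

theorem grt_alt_true (A : List Int) : grt_alt A true = (List.range A.length).map (outT A) := by
  unfold grt_alt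
  simp only [if_true, PySem.List.pyRange_zero_nat, List.map_map]
  exact List.map_congr_left (fun i _ => rfl)

theorem grt_alt_false (A : List Int) : grt_alt A false = (List.range A.length).map (outF A) := by
  unfold grt_alt
  simp only [Bool.false_eq_true, if_false, PySem.List.pyRange_zero_nat, List.map_map]
  exact List.map_congr_left (fun i _ => rfl)

-- ===== VERDICT (by name: the statement is the Claim_ definition above) =====
theorem grt_spec : Claim_equal_grt := by
  intro A prev _
  unfold Spec_grt
  cases prev
  · rw [grt_false, grt_alt_false]
  · rw [grt_true, grt_alt_true]
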